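-- pv_equiv track=rewrite | github.com/mmajewsk/aoc2023 | 18/task.py | data_to_path
-- ===== SOURCE A (Python) =====
-- def data_to_path(data, p2=False):
--     path = [(0,0)]
--     a,b = 0,0
--     for direction, length, color in data:
--         if p2 == True:
--             value = int(color[2:-2], 16)
--             direction = "RDLU"[int(color[-2])]
--             length = value
--         if direction == "R":
--             a += int(length)
--         elif direction == "L":
--             a -= int(length)
--         elif direction == "U":
--             b += int(length)
--         elif direction == "D":
--             b -= int(length)
--         path.append((a,b))
--     return path
-- ===== SOURCE B (Python) =====
-- DIRS = {"R": (1, 0), "L": (-1, 0), "U": (0, 1), "D": (0, -1)}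
--
--
-- def data_to_path(data, p2=False):
--     # pass 1: decode each instruction into a delta vector (unit dir * length)
--     deltas = []
--     for direction, length, color in data:
--         if p2:
--             length = int(color[2:-2], 16)
--             direction = "RDLU"[int(color[-2])]
--         u = DIRS.get(direction)
--         deltas.append((u[0] * int(length), u[1] * int(length)) if u else (0, 0))
--     # pass 2: prefix-sum the deltas starting from (0, 0)
--     path = [(0, 0)]
--     for dx, dy in deltas:
--         x, y = path[-1]
--         path.append((x + dx, y + dy))
--     return path
-- ===== Notes on version B (the rewrite author's own statement) =====
-- stated objective: alternative
-- what changed: Replaces A's single fused loop with if/elif direction branches by two separated passes: a decode pass mapping each instruction to a delta vector via a unit-vector lookup table times the length, then a prefix-sum pass accumulating the deltas from (0,0).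
import Mathlib
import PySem

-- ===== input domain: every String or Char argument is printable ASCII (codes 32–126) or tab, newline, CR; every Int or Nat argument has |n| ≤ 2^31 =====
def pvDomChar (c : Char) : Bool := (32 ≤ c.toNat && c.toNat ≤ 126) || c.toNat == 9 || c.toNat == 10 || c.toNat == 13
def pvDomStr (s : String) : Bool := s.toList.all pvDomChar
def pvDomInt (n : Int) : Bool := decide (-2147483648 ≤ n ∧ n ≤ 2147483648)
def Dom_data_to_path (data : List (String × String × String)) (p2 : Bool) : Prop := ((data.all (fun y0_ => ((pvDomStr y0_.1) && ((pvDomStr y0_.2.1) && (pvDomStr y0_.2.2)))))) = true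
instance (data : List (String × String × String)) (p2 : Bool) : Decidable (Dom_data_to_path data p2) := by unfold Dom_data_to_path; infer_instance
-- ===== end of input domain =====

-- B separates A's fused accumulation loop into two passes: decode each instruction to a
-- delta vector (unit-direction table × length), then prefix-sum the deltas from (0,0);
-- same cost, different decomposition (objective: alternative).

-- ===== PORT A =====
-- Decode of (direction, length) with the p2 branch; `.getD` defaults are only reached on
-- inputs where Python raises (ValueError/IndexError), which Pre_data_to_path excludes.
def pvDecodeA (p2 : Bool) (direction length color : String) : String × Int :=
  if p2 = true then
    let value := (PySem.Int.ofStrBase? (PySem.Str.slice color (some 2) (some (-2))) 16).getD 0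
    let d := (PySem.Int.ofStr? (String.ofList [(PySem.Str.pyGet? color (-2)).getD ' '])).getD 0
    (String.ofList [(PySem.Str.pyGet? "RDLU" d).getD ' '], value)
  else
    (direction, (PySem.Int.ofStr? length).getD 0)

def pvLoopA (p2 : Bool) : List (String × String × String) → Int → Int → List (Int × Int)
  | [], _, _ => []
  | (direction, length, color) :: rest, a, b =>
    let dl := pvDecodeA p2 direction length color
    let ab : Int × Int :=
      if dl.1 = "R" then (a + dl.2, b)
      else if dl.1 = "L" then (a - dl.2, b)
      else if dl.1 = "U" then (a, b + dl.2)
      else if dl.1 = "D" then (a, b - dl.2)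
      else (a, b)
    ab :: pvLoopA p2 rest ab.1 ab.2

def data_to_path (data : List (String × String × String)) (p2 : Bool) : List (Int × Int) :=
  (0, 0) :: pvLoopA p2 data 0 0

-- ===== PORT B =====
def pvDirs : PySem.Dict String (Int × Int) :=
  PySem.Dict.ofList [("R", (1, 0)), ("L", (-1, 0)), ("U", (0, 1)), ("D", (0, -1))]

-- same decode expressions as the Python (the p2 branch and int(length) at the use site)
def pvDelta (p2 : Bool) (item : String × String × String) : Int × Int :=
  let dl : String × Int :=
    if p2 = true then
      ((String.ofList [(PySem.Str.pyGet? "RDLU"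
          ((PySem.Int.ofStr? (String.ofList [(PySem.Str.pyGet? item.2.2 (-2)).getD ' '])).getD 0)).getD ' ']),
       (PySem.Int.ofStrBase? (PySem.Str.slice item.2.2 (some 2) (some (-2))) 16).getD 0)
    else
      (item.1, (PySem.Int.ofStr? item.2.1).getD 0)
  match PySem.Dict.get? pvDirs dl.1 with
  | some u => (u.1 * dl.2, u.2 * dl.2)
  | none => (0, 0)

def pvScan : List (Int × Int) → Int × Int → List (Int × Int)
  | [], _ => []
  | (dx, dy) :: rest, (x, y) => (x + dx, y + dy) :: pvScan rest (x + dx, y + dy)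

def data_to_path_alt (data : List (String × String × String)) (p2 : Bool) : List (Int × Int) :=
  let deltas := data.map (pvDelta p2)
  (0, 0) :: pvScan deltas (0, 0)

-- ===== PRECONDITION & SPEC =====
-- Pre_ excludes exactly the inputs where Python A raises: with p2, a color whose hex slice
-- color[2:-2] is not a valid int(.,16) literal, whose color[-2] char is not a decimal int,
-- or whose decoded digit is outside 0..3 (IndexError in "RDLU"[d]); without p2, an item whose
-- direction is R/L/U/D but whose length is not a valid int literal.
def pvItemOk (p2 : Bool) (item : String × String × String) : Bool :=
  if p2 then
    (PySem.Int.ofStrBase? (PySem.Str.slice item.2.2 (some 2) (some (-2))) 16).isSome &&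
    (match PySem.Str.pyGet? item.2.2 (-2) with
     | some c =>
       match PySem.Int.ofStr? (String.ofList [c]) with
       | some d => decide (0 ≤ d ∧ d < 4)
       | none => false
     | none => false)
  else
    if item.1 == "R" || item.1 == "L" || item.1 == "U" || item.1 == "D" then
      (PySem.Int.ofStr? item.2.1).isSome
    else
      true

def Pre_data_to_path (data : List (String × String × String)) (p2 : Bool) : Prop :=
  (data.all (pvItemOk p2)) = true

instance (data : List (String × String × String)) (p2 : Bool) : Decidable (Pre_data_to_path data p2) := by
  unfold Pre_data_to_path; infer_instance

def pvWitness_data_to_path : (List (String × String × String)) × Bool :=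
  ([("R", "6", "(#70c710)"), ("D", "5", "(#0dc571)")], false)

def Spec_data_to_path (data : List (String × String × String)) (p2 : Bool) (out : List (Int × Int)) : Prop := out = data_to_path_alt data p2
instance (data : List (String × String × String)) (p2 : Bool) (out : List (Int × Int)) : Decidable (Spec_data_to_path data p2 out) := by unfold Spec_data_to_path; infer_instance

-- ===== CLAIM (what is proved, stated in full; the proofs are below) =====
def Claim_equal_data_to_path : Prop := ∀ (data : List (String × String × String)) (p2 : Bool), Dom_data_to_path data p2 → Pre_data_to_path data p2 → Spec_data_to_path data p2 (data_to_path data p2)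

-- ===== LEMMAS AND PROOFS =====

theorem pvDirs_get_none (s : String) (h1 : s ≠ "R") (h2 : s ≠ "L") (h3 : s ≠ "U") (h4 : s ≠ "D") :
    PySem.Dict.get? pvDirs s = none := by
  have h : pvDirs = PySem.Dict.mk [("R",(1,0)),("L",(-1,0)),("U",(0,1)),("D",(0,-1))] := by decide
  rw [h, PySem.Dict.get?_mk_cons, PySem.Dict.get?_mk_cons, PySem.Dict.get?_mk_cons,
    PySem.Dict.get?_mk_cons]
  have e1 : ("R" == s) = false := by simp [Ne.symm h1]
  have e2 : ("L" == s) = false := by simp [Ne.symm h2]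
  have e3 : ("U" == s) = false := by simp [Ne.symm h3]
  have e4 : ("D" == s) = false := by simp [Ne.symm h4]
  rw [e1, e2, e3, e4]
  simp [PySem.Dict.get?]

-- A's branch chain applied to (a, b) moves by the unit-vector-times-length delta.
theorem pvStep_gen (s : String) (L a b : Int) :
    (if s = "R" then (a + L, b)
     else if s = "L" then (a - L, b)
     else if s = "U" then (a, b + L)
     else if s = "D" then (a, b - L)
     else (a, b))
    = (a + (match PySem.Dict.get? pvDirs s with
            | some u => (u.1 * L, u.2 * L)
            | none => ((0 : Int), (0 : Int))).1,
       b + (match PySem.Dict.get? pvDirs s with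
            | some u => (u.1 * L, u.2 * L)
            | none => ((0 : Int), (0 : Int))).2) := by
  by_cases h1 : s = "R"
  · subst h1
    have : PySem.Dict.get? pvDirs "R" = some (1, 0) := by decide
    simp [this]
  by_cases h2 : s = "L"
  · subst h2
    have : PySem.Dict.get? pvDirs "L" = some (-1, 0) := by decide
    simp [this, h1]
    omega
  by_cases h3 : s = "U"
  · subst h3
    have : PySem.Dict.get? pvDirs "U" = some (0, 1) := by decide
    simp [this, h1, h2]
  by_cases h4 : s = "D"
  · subst h4
    have : PySem.Dict.get? pvDirs "D" = some (0, -1) := by decide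
    simp [this, h1, h2, h3]
    omega
  · rw [pvDirs_get_none s h1 h2 h3 h4]
    simp [h1, h2, h3, h4]

-- B's delta is the dict lookup applied to the same decode A performs.
theorem pvDelta_eq (p2 : Bool) (direction length color : String) :
    pvDelta p2 (direction, length, color)
    = (match PySem.Dict.get? pvDirs (pvDecodeA p2 direction length color).1 with
       | some u => (u.1 * (pvDecodeA p2 direction length color).2,
                    u.2 * (pvDecodeA p2 direction length color).2)
       | none => ((0 : Int), (0 : Int))) := by
  cases p2 <;> simp [pvDelta, pvDecodeA]

theorem pvLoop_eq (p2 : Bool) (l : List (String × String × String)) (a b : Int) :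
    pvLoopA p2 l a b = pvScan (l.map (pvDelta p2)) (a, b) := by
  induction l generalizing a b with
  | nil => simp [pvLoopA, pvScan]
  | cons hd tl ih =>
    obtain ⟨direction, length, color⟩ := hd
    simp only [pvLoopA, List.map_cons]
    rw [pvStep_gen (pvDecodeA p2 direction length color).1
        (pvDecodeA p2 direction length color).2 a b, ← pvDelta_eq]
    have hd' : pvDelta p2 (direction, length, color)
        = ((pvDelta p2 (direction, length, color)).1,
           (pvDelta p2 (direction, length, color)).2) := rfl
    rw [hd']
    simp only [pvScan]
    exact congrArg _ (ih _ _)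

-- ===== VERDICT (by name: the statement is the Claim_ definition above) =====
theorem data_to_path_spec : Claim_equal_data_to_path := by
  intro data p2 _ _
  unfold Spec_data_to_path data_to_path data_to_path_alt
  rw [pvLoop_eq]
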